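-- pv_equiv track=rewrite | github.com/SahilModi/CS196 | Homework/fa17-hw4-SahilModi/hw4.py | alphabet_finder
-- ===== SOURCE A (Python) =====
-- def alphabet_finder(sentence):
--     """
--     Given a string, returns the shortest substring that:
--         1. starts from the beginning of the string
--         2. contains all the letters of the alphabet (case insensitive)
--     If this is never true, return None.
--
--     Args:
--         (str) sentence: the input string
--
--     Returns:
--         (str) the shortest substring of sentence that satisfies both (1) and (2).
--     """
--     alphabet = list("abcdefghijklmnopqrstuvwxyz")
--     sentence = sentence.lower()
--     index_end = 0
--
--     for i in range(len(alphabet)):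
--         tempIndex = sentence.find(alphabet[i])
--         if tempIndex > index_end:
--                 index_end = tempIndex
--         elif tempIndex == -1:
--             return None
--
--
--     return sentence[:index_end + 1]
-- ===== SOURCE B (Python) =====
-- def alphabet_finder(sentence):
--     sentence = sentence.lower()
--     first = {}
--     for i, c in enumerate(sentence):
--         if 'a' <= c <= 'z' and c not in first:
--             first[c] = i
--     if len(first) < 26:
--         return None
--     return sentence[:max(first.values()) + 1]
-- ===== Notes on version B (the rewrite author's own statement) =====
-- stated objective: alternative
-- what changed: Replaces A's 26 repeated sentence.find() scans with a single enumerate pass over the lowered string that records each letter's first index in a dict, returning None if fewer than 26 letters were seen and otherwise the slice up to max(first indices)+1.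
import Mathlib
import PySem

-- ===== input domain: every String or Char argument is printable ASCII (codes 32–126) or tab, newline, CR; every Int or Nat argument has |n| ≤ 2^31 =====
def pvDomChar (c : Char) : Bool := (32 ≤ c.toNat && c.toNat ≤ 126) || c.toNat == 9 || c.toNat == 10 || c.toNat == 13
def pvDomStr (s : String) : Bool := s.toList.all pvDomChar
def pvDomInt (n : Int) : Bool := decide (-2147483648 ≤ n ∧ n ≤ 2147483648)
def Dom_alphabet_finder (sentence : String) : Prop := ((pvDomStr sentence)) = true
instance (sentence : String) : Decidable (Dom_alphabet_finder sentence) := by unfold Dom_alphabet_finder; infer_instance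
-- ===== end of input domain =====

-- B replaces A's 26 repeated find() scans with one pass over the lowered string recording each letter's first index in a dict.

-- ===== PORT A =====
-- alphabet = list("abcdefghijklmnopqrstuvwxyz")
def pvAlphabetA : List Char :=
  ['a','b','c','d','e','f','g','h','i','j','k','l','m','n','o','p','q','r','s','t','u','v','w','x','y','z']

-- the for-loop over the alphabet, with state index_end and the early 'return None'
def pvLoopA (s : List Char) : List Char → Int → Option Int
  | [], e => some e
  | c :: cs, e =>
    let t := PySem.Chars.find s [c]
    if t > e then pvLoopA s cs t
    else if t = -1 then none
    else pvLoopA s cs e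

def alphabet_finder (sentence : String) : Option String :=
  let s := PySem.Str.lower sentence
  match pvLoopA s.toList pvAlphabetA 0 with
  | none => none
  | some e => some (PySem.Str.slice s none (some (e + 1)))

-- ===== PORT B =====
-- loop body: if 'a' <= c <= 'z' and c not in first: first[c] = i
def pvStepB (d : PySem.Dict Char Int) (p : Int × Char) : PySem.Dict Char Int :=
  if ('a' ≤ p.2 ∧ p.2 ≤ 'z') ∧ d.contains p.2 = false then d.insert p.2 p.1 else d

def alphabet_finder_alt (sentence : String) : Option String :=
  let s := PySem.Str.lower sentence
  let first := (PySem.List.enumerate s.toList 0).foldl pvStepB PySem.Dict.empty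
  if first.size < 26 then none
  else (PySem.List.max? first.values (fun v => v)).map
    (fun m => PySem.Str.slice s none (some (m + 1)))

-- ===== PRECONDITION & SPEC =====
def Spec_alphabet_finder (sentence : String) (out : Option String) : Prop := out = alphabet_finder_alt sentence
instance (sentence : String) (out : Option String) : Decidable (Spec_alphabet_finder sentence out) := by unfold Spec_alphabet_finder; infer_instance

-- ===== CLAIM (what is proved, stated in full; the proofs are below) =====
def Claim_equal_alphabet_finder : Prop := ∀ (sentence : String), Dom_alphabet_finder sentence → Spec_alphabet_finder sentence (alphabet_finder sentence)

-- ===== LEMMAS AND PROOFS =====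

-- A's loop computes the running max of the find() results, none as soon as one is -1
theorem pvLoopA_eq (l : List Char) (cs : List Char) (e : Int) (he : 0 ≤ e) :
    pvLoopA l cs e =
      if cs.all (fun c => PySem.Chars.find l [c] != -1) then
        some (cs.foldl (fun a c => max a (PySem.Chars.find l [c])) e)
      else none := by
  induction cs generalizing e with
  | nil => simp [pvLoopA]
  | cons c cs ih =>
    have hge := PySem.Chars.neg_one_le_find (s := l) (sub := [c])
    by_cases h1 : PySem.Chars.find l [c] = -1
    · have hng : ¬ PySem.Chars.find l [c] > e := by omega
      simp [pvLoopA, h1]; omega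
    · have h0 : 0 ≤ PySem.Chars.find l [c] := by omega
      by_cases h2 : PySem.Chars.find l [c] > e
      · have hm : max e (PySem.Chars.find l [c]) = PySem.Chars.find l [c] := by omega
        simp [pvLoopA, h2, ih _ h0, h1, hm]
      · have hm : max e (PySem.Chars.find l [c]) = e := by omega
        simp [pvLoopA, h2, h1, ih _ he, hm]

-- a singleton pattern is a prefix of drop j exactly when l[j] is that character
theorem pvSingle_prefix_drop (c : Char) (l : List Char) (j : Nat) :
    [c] <+: l.drop j ↔ l[j]? = some c := by
  constructor
  · rintro ⟨t, ht⟩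
    have : (l.drop j)[0]? = some c := by rw [← ht]; rfl
    simpa [List.getElem?_drop] using this
  · intro h
    have hj : j < l.length := (List.getElem?_eq_some_iff.mp h).1
    have : l.drop j = c :: l.drop (j+1) := by
      rw [List.drop_eq_getElem_cons hj]
      simp [(List.getElem?_eq_some_iff.mp h).2]
    exact ⟨l.drop (j+1), by rw [this]; rfl⟩

-- find of a single character is the first index of that character
theorem pvFind_singleton (l : List Char) (c : Char) :
    PySem.Chars.find l [c] =
      match PySem.List.index? l c with
      | none => -1
      | some i => (i : Int) := by
  cases hidx : PySem.List.index? l c with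
  | none =>
    have hnm : c ∉ l := (PySem.List.index?_eq_none_iff (xs := l) (v := c)).mp hidx
    simp [PySem.Chars.find_eq_neg_one_iff, List.singleton_infix_iff, hnm]
  | some i =>
    obtain ⟨hk, hel, hmin⟩ := PySem.List.getElem_of_index?_eq_some hidx
    have hmem : c ∈ l := hel ▸ List.getElem_mem hk
    have h0 : 0 ≤ PySem.Chars.find l [c] := by
      rw [PySem.Chars.find_nonneg_iff, List.singleton_infix_iff]; exact hmem
    obtain ⟨hpre, hless⟩ := PySem.Chars.find_spec h0
    set n := (PySem.Chars.find l [c]).toNat with hn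
    have h1 : l[n]? = some c := (pvSingle_prefix_drop c l n).mp hpre
    have h2 : n ≤ i := by
      by_contra hlt
      push Not at hlt
      exact hless i hlt ((pvSingle_prefix_drop c l i).mpr (by simp [hel, hk]))
    have h3 : i ≤ n := by
      by_contra hlt
      push Not at hlt
      exact hmin n hlt (by simpa using (List.getElem?_eq_some_iff.mp h1).2)
    simp only []
    omega

-- the letter bounds characterise membership in the alphabet list
theorem pvMem_alphabet (c : Char) : c ∈ pvAlphabetA ↔ ('a' ≤ c ∧ c ≤ 'z') := by
  constructor
  · intro h; fin_cases h <;> exact ⟨by decide, by decide⟩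
  · rintro ⟨h1, h2⟩
    have hn1 : 97 ≤ c.toNat := Nat.succ_le_of_lt h1
    have hn2 : c.toNat ≤ 122 := h2
    rw [← Char.ofNat_toNat c]
    interval_cases h : c.toNat <;> decide

-- B's dict lookup after the pass: the first index of c, shifted by the enumerate start
theorem pvGetB (c : Char) (hc : 'a' ≤ c ∧ c ≤ 'z') (l : List Char) (k : Int) (d0 : PySem.Dict Char Int) :
    ((PySem.List.enumerate l k).foldl pvStepB d0).get? c =
      match d0.get? c with
      | some v => some v
      | none => (PySem.List.index? l c).map (fun i => k + (i : Int)) := by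
  induction l generalizing k d0 with
  | nil =>
    cases h : d0.get? c <;> simp [PySem.List.enumerate, h]
  | cons x xs ih =>
    rw [PySem.List.enumerate_cons, List.foldl_cons, ih]
    by_cases hxc : x = c
    · subst hxc
      by_cases hcont : d0.contains x = false
      · have hnone : d0.get? x = none := by
          rw [PySem.Dict.get?_eq_none_iff_contains]; exact hcont
        rw [PySem.List.index?_cons_self]
        simp [pvStepB, hc, hcont, hnone, PySem.Dict.get?_insert_self]
      · have hsome : (d0.get? x).isSome := by
          rw [← PySem.Dict.contains_eq_isSome_get?]; simpa using hcont
        obtain ⟨v, hv⟩ := Option.isSome_iff_exists.mp hsome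
        simp [pvStepB, hcont, hv]
    · have hstep : (pvStepB d0 (k, x)).get? c = d0.get? c := by
        unfold pvStepB
        split
        · exact PySem.Dict.get?_insert_of_ne _ _ (Ne.symm hxc)
        · rfl
      rw [hstep, PySem.List.index?_cons_of_ne _ hxc]
      cases h : d0.get? c with
      | some v => simp
      | none =>
        cases hi : PySem.List.index? xs c with
        | none => simp
        | some i => simp; ring

-- keys stay nodup letters through the pass
theorem pvKeysB (ps : List (Int × Char)) (d0 : PySem.Dict Char Int)
    (h1 : d0.keys.Nodup) (h2 : ∀ x ∈ d0.keys, 'a' ≤ x ∧ x ≤ 'z') :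
    (ps.foldl pvStepB d0).keys.Nodup ∧ ∀ x ∈ (ps.foldl pvStepB d0).keys, 'a' ≤ x ∧ x ≤ 'z' := by
  induction ps generalizing d0 with
  | nil => exact ⟨h1, h2⟩
  | cons p ps ih =>
    rw [List.foldl_cons]
    by_cases hcond : ('a' ≤ p.2 ∧ p.2 ≤ 'z') ∧ d0.contains p.2 = false
    · have hs : pvStepB d0 p = d0.insert p.2 p.1 := by simp [pvStepB, hcond]
      rw [hs]
      apply ih
      · exact PySem.Dict.nodup_keys_insert _ _ _ h1
      · intro x hx
        rcases (PySem.Dict.mem_keys_insert _ _ _ _).mp hx with h | h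
        · subst h; exact hcond.1
        · exact h2 x h
    · have hs : pvStepB d0 p = d0 := by simp [pvStepB, hcond]
      rw [hs]
      exact ih d0 h1 h2

-- the two computations agree on any (lowered) string
theorem pvCore (s : String) :
    (match pvLoopA s.toList pvAlphabetA 0 with
      | none => none
      | some e => some (PySem.Str.slice s none (some (e + 1)))) =
    (if ((PySem.List.enumerate s.toList 0).foldl pvStepB PySem.Dict.empty).size < 26 then none
     else (PySem.List.max? ((PySem.List.enumerate s.toList 0).foldl pvStepB PySem.Dict.empty).values (fun v => v)).map
       (fun m => PySem.Str.slice s none (some (m + 1)))) := by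
  set l := s.toList with hl
  set first := (PySem.List.enumerate l 0).foldl pvStepB PySem.Dict.empty with hfirst
  -- dict facts
  have hget : ∀ c, 'a' ≤ c → c ≤ 'z' →
      first.get? c = (PySem.List.index? l c).map (fun i => (i : Int)) := by
    intro c h1 h2
    rw [hfirst, pvGetB c ⟨h1, h2⟩ l 0 PySem.Dict.empty]
    rw [PySem.Dict.get?_empty]
    cases PySem.List.index? l c <;> simp
  have hkeys := pvKeysB (PySem.List.enumerate l 0) PySem.Dict.empty
      (by simp) (by simp [PySem.Dict.keys_empty])
  rw [← hfirst] at hkeys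
  obtain ⟨hnd, hletters⟩ := hkeys
  have hsub : first.keys ⊆ pvAlphabetA := by
    intro x hx
    exact (pvMem_alphabet x).mpr (hletters x hx)
  have hsize : first.size = first.keys.length := by
    simp [PySem.Dict.size, PySem.Dict.keys]
  have hmemkeys : ∀ c, 'a' ≤ c → c ≤ 'z' → (c ∈ first.keys ↔ c ∈ l) := by
    intro c h1 h2
    rw [← PySem.Dict.contains_iff_mem_keys, PySem.Dict.contains_eq_isSome_get?,
      hget c h1 h2, ← PySem.List.index?_isSome_iff l c]
    cases PySem.List.index? l c <;> simp
  have hAnodup : pvAlphabetA.Nodup := by decide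
  by_cases hall : ∀ c ∈ pvAlphabetA, c ∈ l
  -- every letter occurs
  · have hallfind : pvAlphabetA.all (fun c => PySem.Chars.find l [c] != -1) = true := by
      rw [List.all_eq_true]
      intro c hc
      rw [pvFind_singleton]
      cases hi : PySem.List.index? l c with
      | none => exact absurd (hall c hc) ((PySem.List.index?_eq_none_iff l c).mp hi)
      | some i => simp
    rw [pvLoopA_eq l pvAlphabetA 0 le_rfl, hallfind]
    -- B does not return none
    have hAsubK : pvAlphabetA ⊆ first.keys := by
      intro c hc
      have hb := (pvMem_alphabet c).mp hc
      exact (hmemkeys c hb.1 hb.2).mpr (hall c hc)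
    have hperm : first.keys.Perm pvAlphabetA :=
      (List.subperm_of_subset hnd hsub).antisymm (List.subperm_of_subset hAnodup hAsubK)
    have hlen : first.keys.length = 26 := by
      simpa using hperm.length_eq
    have hnotlt : ¬ first.size < 26 := by omega
    rw [if_neg hnotlt]
    -- characterise the values
    have hvals : first.values = first.keys.map (fun c => PySem.Chars.find l [c]) := by
      rw [PySem.Dict.values_eq_map_keys first hnd 0]
      apply List.map_congr_left
      intro c hc
      have hb := hletters c hc
      have hcl : c ∈ l := (hmemkeys c hb.1 hb.2).mp hc
      cases hi : PySem.List.index? l c with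
      | none => exact absurd hcl ((PySem.List.index?_eq_none_iff l c).mp hi)
      | some i =>
        rw [PySem.Dict.getD_eq_get?_getD, hget c hb.1 hb.2, hi, pvFind_singleton, hi]
        simp
    have hvperm : first.values.Perm (pvAlphabetA.map (fun c => PySem.Chars.find l [c])) := by
      rw [hvals]; exact hperm.map _
    have hvne : first.values ≠ [] := by
      intro h
      have := hvperm.length_eq
      rw [h] at this
      simp only [List.length_nil, List.length_map] at this
      exact absurd this.symm (by decide)
    obtain ⟨m, hm⟩ := Option.ne_none_iff_exists'.mp
      (fun h => hvne ((PySem.List.max?_eq_none_iff first.values (fun v => v)).mp h))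
    rw [hm]
    -- the two extrema agree
    set g := fun c => PySem.Chars.find l [c] with hg
    set estar := pvAlphabetA.foldl (fun a c => max a (g c)) 0 with hestar
    have hfold : estar = (pvAlphabetA.map g).foldl max 0 := by
      rw [hestar, List.foldl_map]
    have hmmem : m ∈ pvAlphabetA.map g := hvperm.mem_iff.mp (PySem.List.max?_mem hm)
    have hmmax : ∀ y ∈ pvAlphabetA.map g, y ≤ m := by
      intro y hy
      exact PySem.List.max?_isMax hm y (hvperm.mem_iff.mpr hy)
    have h1 : m ≤ estar := by
      rw [hfold]
      exact (PySem.List.le_foldl_max (pvAlphabetA.map g) 0).2 m hmmem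
    have h2 : estar ≤ m := by
      rcases PySem.List.foldl_max_mem (pvAlphabetA.map g) 0 with h | h
      · -- estar = 0: g 'a' is 0 ≤ m
        rw [hfold, h]
        have hga : g 'a' ∈ pvAlphabetA.map g := List.mem_map_of_mem (by decide)
        have hle : g 'a' ≤ estar := (PySem.List.le_foldl_max (pvAlphabetA.map g) 0).2 _ hga |>.trans_eq (hfold).symm
        have hge : 0 ≤ g 'a' := by
          rw [hg]
          simp only []
          rw [pvFind_singleton]
          cases hi : PySem.List.index? l 'a' with
          | none => exact absurd (hall 'a' (by decide)) ((PySem.List.index?_eq_none_iff l 'a').mp hi)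
          | some i => simp
        have := hmmax _ hga
        omega
      · rw [hfold] at *
        exact hmmax _ h
    have hme : m = estar := le_antisymm h1 h2
    simp [hme]
  -- some letter missing
  · push Not at hall
    obtain ⟨c0, hc0A, hc0l⟩ := hall
    have hfindneg : pvAlphabetA.all (fun c => PySem.Chars.find l [c] != -1) = false := by
      rw [List.all_eq_false]
      refine ⟨c0, hc0A, ?_⟩
      rw [pvFind_singleton, (PySem.List.index?_eq_none_iff l c0).mpr hc0l]
      simp
    rw [pvLoopA_eq l pvAlphabetA 0 le_rfl, hfindneg]
    have hb0 := (pvMem_alphabet c0).mp hc0A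
    have hc0nk : c0 ∉ first.keys := fun h => hc0l ((hmemkeys c0 hb0.1 hb0.2).mp h)
    have hsub' : first.keys ⊆ pvAlphabetA.erase c0 := by
      intro x hx
      exact (hAnodup.mem_erase_iff).mpr ⟨fun h => hc0nk (h ▸ hx), hsub hx⟩
    have hle : first.keys.length ≤ (pvAlphabetA.erase c0).length :=
      (List.subperm_of_subset hnd hsub').length_le
    have hlen25 : (pvAlphabetA.erase c0).length = 25 := by
      rw [List.length_erase_of_mem hc0A]; rfl
    have : first.size < 26 := by omega
    rw [if_pos this]
    simp

-- ===== VERDICT (by name: the statement is the Claim_ definition above) =====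
theorem alphabet_finder_spec : Claim_equal_alphabet_finder := by
  intro sentence _
  unfold Spec_alphabet_finder alphabet_finder alphabet_finder_alt
  exact pvCore (PySem.Str.lower sentence)
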